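-- pv_equiv track=rewrite | github.com/wyf162/pythonProject | leetcode/contest/2022/07/week-304-20220731.py | maximumGroups
-- ===== SOURCE A (Python) =====
-- from typing import List
--
-- def maximumGroups(grades: List[int]) -> int:
--     n = len(grades)
--     s = 0
--     l = 1
--     while s + l <= n:
--         s += l
--         l += 1
--     return l - 1
-- ===== SOURCE B (Python) =====
-- from typing import List
-- from math import isqrt
--
-- def maximumGroups(grades: List[int]) -> int:
--     n = len(grades)
--     return (isqrt(8 * n + 1) - 1) // 2
-- ===== Notes on version B (the rewrite author's own statement) =====
-- stated objective: simpler
-- what changed: Replaced the incremental triangular-number while-loop by the closed form (isqrt(8n+1)-1)//2.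
import Mathlib
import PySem

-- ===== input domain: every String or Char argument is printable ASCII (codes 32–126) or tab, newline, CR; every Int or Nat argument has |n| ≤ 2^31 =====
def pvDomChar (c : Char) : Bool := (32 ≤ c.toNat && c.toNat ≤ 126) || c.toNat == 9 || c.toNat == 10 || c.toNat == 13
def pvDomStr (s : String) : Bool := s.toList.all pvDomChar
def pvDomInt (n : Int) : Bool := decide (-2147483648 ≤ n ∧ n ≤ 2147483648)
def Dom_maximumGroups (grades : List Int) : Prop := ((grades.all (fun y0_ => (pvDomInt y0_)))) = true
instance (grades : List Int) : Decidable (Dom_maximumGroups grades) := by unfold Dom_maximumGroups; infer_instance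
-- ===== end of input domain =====

-- B replaces A's incremental triangular-number loop by the closed form (isqrt(8n+1)-1)//2 (objective: simpler).


-- ===== PORT A =====
-- the while loop of A; fuel = n+1 steps is always enough (l grows by 1 each iteration), proved below
def maximumGroupsLoop (n : Int) (fuel : Nat) (s l : Int) : Int :=
  match fuel with
  | 0 => l - 1
  | Nat.succ f => if s + l ≤ n then maximumGroupsLoop n f (s + l) (l + 1) else l - 1

def maximumGroups (grades : List Int) : Int :=
  let n : Int := grades.length
  maximumGroupsLoop n (n.toNat + 1) 0 1

-- ===== PORT B =====
def maximumGroups_alt (grades : List Int) : Int :=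
  let n : Int := grades.length
  PySem.Int.floordiv ((Nat.sqrt (8 * n + 1).toNat : Int) - 1) 2

-- ===== PRECONDITION & SPEC =====
def Spec_maximumGroups (grades : List Int) (out : Int) : Prop := out = maximumGroups_alt grades
instance (grades : List Int) (out : Int) : Decidable (Spec_maximumGroups grades out) := by unfold Spec_maximumGroups; infer_instance

-- ===== CLAIM (what is proved, stated in full; the proofs are below) =====
def Claim_equal_maximumGroups : Prop := ∀ (grades : List Int), Dom_maximumGroups grades → Spec_maximumGroups grades (maximumGroups grades)

-- ===== LEMMAS AND PROOFS =====

-- q is the unique integer with q(q+1) ≤ 2n < (q+1)(q+2); the loop, started with the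
-- triangular invariant 2s = l(l-1), returns exactly q as long as fuel exceeds q+1-l.
lemma loop_eq (n q : Int) (hq0 : 0 ≤ q) (hlow : q * (q + 1) ≤ 2 * n)
    (hhigh : 2 * n < (q + 1) * (q + 2)) :
    ∀ (fuel : Nat) (l s : Int), 1 ≤ l → l ≤ q + 1 → 2 * s = l * (l - 1) →
      q + 1 - l < (fuel : Int) → maximumGroupsLoop n fuel s l = q := by
  intro fuel
  induction fuel with
  | zero => intro l s h1 h2 h3 h4; exact absurd h4 (by push_cast; omega)
  | succ f ih =>
    intro l s h1 h2 h3 h4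
    simp only [maximumGroupsLoop]
    split
    · rename_i hle
      -- 2(s+l) = l(l+1) ≤ 2n, so l ≤ q
      have hll : l * (l + 1) ≤ 2 * n := by nlinarith
      have hlq : l ≤ q := by nlinarith
      exact ih (l + 1) (s + l) (by omega) (by omega) (by ring_nf; nlinarith) (by push_cast at h4 ⊢; omega)
    · rename_i hgt
      -- n < s + l, so 2n < l(l+1), hence q < l; with l ≤ q+1 this gives l-1 = q
      have hlt : 2 * n < l * (l + 1) := by nlinarith
      have : q < l := by nlinarith
      omega

lemma mg_eq (grades : List Int) : maximumGroups grades = maximumGroups_alt grades := by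
  set N : Nat := grades.length with hN
  have hn : ((N : Int)).toNat = N := Int.toNat_natCast N
  have hm : ((8 * (N : Int) + 1)).toNat = 8 * N + 1 := by omega
  show maximumGroupsLoop (N : Int) (((N : Int)).toNat + 1) 0 1
      = PySem.Int.floordiv ((Nat.sqrt (8 * (N : Int) + 1).toNat : Int) - 1) 2
  rw [hm]
  set r : Nat := Nat.sqrt (8 * N + 1) with hr
  set q : Int := PySem.Int.floordiv ((r : Int) - 1) 2 with hq
  -- bracket q from its definition
  have hqb : q * 2 ≤ (r : Int) - 1 ∧ (r : Int) - 1 < (q + 1) * 2 :=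
    (PySem.Int.floordiv_eq_iff_of_pos (by norm_num)).mp hq.symm
  have hr1 : 1 ≤ r := by
    have : 1 * 1 ≤ 8 * N + 1 := by omega
    simpa [hr] using Nat.sqrt_pos.mpr (by omega)
  have hq0 : 0 ≤ q := by omega
  -- sqrt brackets, cast to Int
  have ha1 : r * r ≤ 8 * N + 1 := by have h := Nat.sqrt_le' (8 * N + 1); rw [pow_two] at h; exact h
  have ha2 : 8 * N + 1 < (r + 1) * (r + 1) := by
    have h := Nat.lt_succ_sqrt' (8 * N + 1); rw [pow_two] at h; exact h
  have hs1 : (r : Int) * r ≤ 8 * (N : Int) + 1 := by exact_mod_cast ha1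
  have hs2 : 8 * (N : Int) + 1 < ((r : Int) + 1) * ((r : Int) + 1) := by exact_mod_cast ha2
  have hlow : q * (q + 1) ≤ 2 * (N : Int) := by nlinarith
  have hhigh : 2 * (N : Int) < (q + 1) * (q + 2) := by nlinarith
  have hqn : q ≤ (N : Int) := by nlinarith
  have := loop_eq (N : Int) q hq0 hlow hhigh (((N : Int)).toNat + 1) 1 0
    (by omega) (by omega) (by ring) (by rw [hn]; push_cast; omega)
  simpa using this

-- ===== VERDICT (by name: the statement is the Claim_ definition above) =====
theorem maximumGroups_spec : Claim_equal_maximumGroups := by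
  intro grades _
  exact mg_eq grades
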